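-- pv_equiv track=rewrite | github.com/ivanfeliciano/IRSystemTIME | ir_system.py | vector_dict_add
-- ===== SOURCE A (Python) =====
-- def vector_dict_add(dict_a, dict_b):
-- 	set_of_terms = set(dict_a).union(set(dict_b))
-- 	ans = {}
-- 	for term in set_of_terms:
-- 		a_i = dict_a.get(term, 0)
-- 		b_i = dict_b.get(term, 0)
-- 		ans[term] = a_i + b_i
-- 	return ans
-- ===== SOURCE B (Python) =====
-- def vector_dict_add(dict_a, dict_b):
-- 	ans = dict(dict_a)
-- 	for term, value in dict_b.items():
-- 		ans[term] = ans.get(term, 0) + value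
-- 	return ans
-- ===== Notes on version B (the rewrite author's own statement) =====
-- stated objective: simpler
-- what changed: B seeds the result with a copy of dict_a and accumulates only dict_b's items into it, instead of building the explicit key-union set and doing a symmetric double lookup for every key.
import Mathlib
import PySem

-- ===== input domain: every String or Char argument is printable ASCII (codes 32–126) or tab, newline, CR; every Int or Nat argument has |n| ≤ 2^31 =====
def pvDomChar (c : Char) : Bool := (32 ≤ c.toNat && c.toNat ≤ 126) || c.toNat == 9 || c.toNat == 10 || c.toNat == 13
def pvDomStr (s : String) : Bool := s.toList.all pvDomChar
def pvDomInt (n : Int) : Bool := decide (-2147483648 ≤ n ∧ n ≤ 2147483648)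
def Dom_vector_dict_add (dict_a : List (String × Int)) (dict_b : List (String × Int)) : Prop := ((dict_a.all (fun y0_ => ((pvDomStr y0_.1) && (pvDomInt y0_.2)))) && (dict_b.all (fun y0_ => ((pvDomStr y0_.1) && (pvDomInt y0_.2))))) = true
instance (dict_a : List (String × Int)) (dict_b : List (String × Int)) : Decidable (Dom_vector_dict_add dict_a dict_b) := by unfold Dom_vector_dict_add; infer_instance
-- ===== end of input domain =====

-- B builds the sum by copying dict_a and accumulating dict_b's items, dropping A's explicit key-union set and symmetric double lookup (objective: simpler).


-- ===== PORT A =====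
-- set_of_terms = set(dict_a).union(set(dict_b)); ans = {}; for term in set_of_terms: ans[term] = a.get(term,0)+b.get(term,0)
-- (Python iterates the set in hash order; the result is a dict, compared ignoring order, so the Set's first-insertion order is used here)
def vector_dict_add (dict_a : List (String × Int)) (dict_b : List (String × Int)) : List (String × Int) :=
  let set_of_terms : PySem.Set String :=
    PySem.Set.union (PySem.Set.ofList (dict_a.map (·.1))) (PySem.Set.ofList (dict_b.map (·.1)))
  let ans : PySem.Dict String Int :=
    set_of_terms.foldl
      (fun d term =>
        d.insert term ((PySem.Dict.mk dict_a).getD term 0 + (PySem.Dict.mk dict_b).getD term 0))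
      PySem.Dict.empty
  ans.items

-- ===== PORT B =====
-- ans = dict(dict_a); for term, value in dict_b.items(): ans[term] = ans.get(term, 0) + value; return ans
def vector_dict_add_alt (dict_a : List (String × Int)) (dict_b : List (String × Int)) : List (String × Int) :=
  let ans : PySem.Dict String Int :=
    dict_b.foldl (fun d p => d.insert p.1 (d.getD p.1 0 + p.2)) (PySem.Dict.mk dict_a)
  ans.items

-- ===== PRECONDITION & SPEC =====
-- Pre_ excludes association lists with duplicate keys: they do not represent any Python dict, so A (whose arguments are dicts) never receives them.
def Pre_vector_dict_add (dict_a : List (String × Int)) (dict_b : List (String × Int)) : Prop :=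
  (dict_a.map (·.1)).Nodup ∧ (dict_b.map (·.1)).Nodup
instance (dict_a : List (String × Int)) (dict_b : List (String × Int)) : Decidable (Pre_vector_dict_add dict_a dict_b) := by unfold Pre_vector_dict_add; infer_instance
def pvWitness_vector_dict_add : (List (String × Int)) × (List (String × Int)) :=
  ([("a", 2), ("b", -1)], [("b", 5), ("c", 3)])

def Spec_vector_dict_add (dict_a : List (String × Int)) (dict_b : List (String × Int)) (out : List (String × Int)) : Prop := out = vector_dict_add_alt dict_a dict_b
instance (dict_a : List (String × Int)) (dict_b : List (String × Int)) (out : List (String × Int)) : Decidable (Spec_vector_dict_add dict_a dict_b out) := by unfold Spec_vector_dict_add; infer_instance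

-- ===== CLAIM (what is proved, stated in full; the proofs are below) =====
def Claim_equal_vector_dict_add : Prop := ∀ (dict_a : List (String × Int)) (dict_b : List (String × Int)), Dom_vector_dict_add dict_a dict_b → Pre_vector_dict_add dict_a dict_b → Spec_vector_dict_add dict_a dict_b (vector_dict_add dict_a dict_b)

-- ===== LEMMAS AND PROOFS =====

-- accumulating dict_b (with distinct keys) into d adds dict_b's value at each key
theorem getD_accum (l : List (String × Int)) (hl : (l.map (·.1)).Nodup)
    (d : PySem.Dict String Int) (k : String) :
    (l.foldl (fun d p => d.insert p.1 (d.getD p.1 0 + p.2)) d).getD k 0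
      = d.getD k 0 + (PySem.Dict.mk l).getD k 0 := by
  induction l generalizing d with
  | nil => simp [PySem.Dict.getD, PySem.Dict.get?]
  | cons p rest ih =>
    obtain ⟨k1, v1⟩ := p
    simp only [List.map_cons, List.nodup_cons] at hl
    simp only [List.foldl_cons]
    rw [ih hl.2]
    by_cases hk : k = k1
    · subst hk
      rw [PySem.Dict.getD_insert_self]
      have hnc : (PySem.Dict.mk rest).contains k = false := by
        rw [PySem.Dict.contains_eq_decide_mem_keys]
        simpa [PySem.Dict.keys] using hl.1
      rw [PySem.Dict.getD_of_not_contains _ _ hnc]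
      have : (PySem.Dict.mk ((k, v1) :: rest)).getD k 0 = v1 := by
        simp [PySem.Dict.getD_eq_get?_getD, PySem.Dict.get?_mk_cons]
      omega
    · rw [PySem.Dict.getD_insert_of_ne _ _ _ hk]
      have : (PySem.Dict.mk ((k1, v1) :: rest)).getD k 0 = (PySem.Dict.mk rest).getD k 0 := by
        simp [PySem.Dict.getD_eq_get?_getD, PySem.Dict.get?_mk_cons,
          (by simpa using fun h => hk h.symm : (k1 == k) = false)]
      omega

-- ===== VERDICT (by name: the statement is the Claim_ definition above) =====

theorem vector_dict_add_spec : Claim_equal_vector_dict_add := by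
  intro dict_a dict_b _ hpre
  unfold Spec_vector_dict_add
  obtain ⟨ha, hb⟩ := hpre
  -- the key list both sides produce
  have hka : PySem.Set.ofList (dict_a.map (·.1)) = dict_a.map (·.1) :=
    PySem.Set.ofList_eq_self_of_nodup _ ha
  have hterms_nodup : (PySem.Set.union (PySem.Set.ofList (dict_a.map (·.1))) (PySem.Set.ofList (dict_b.map (·.1)))).Nodup :=
    PySem.Set.nodup_union _ _ (PySem.Set.nodup_ofList _)
  -- A's side: fold of fresh distinct keys into the empty dict appends
  have hA : (vector_dict_add dict_a dict_b) =
      (PySem.Set.union (PySem.Set.ofList (dict_a.map (·.1))) (PySem.Set.ofList (dict_b.map (·.1)))).map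
        (fun t => (t, (PySem.Dict.mk dict_a).getD t 0 + (PySem.Dict.mk dict_b).getD t 0)) := by
    unfold vector_dict_add
    have := PySem.Dict.items_foldl_insert_fresh
      (l := PySem.Set.union (PySem.Set.ofList (dict_a.map (·.1))) (PySem.Set.ofList (dict_b.map (·.1))))
      (k := fun t => t)
      (v := fun t => (PySem.Dict.mk dict_a).getD t 0 + (PySem.Dict.mk dict_b).getD t 0)
      (d := PySem.Dict.empty)
      (by intro a _; simp [PySem.Dict.contains_empty])
      (by simpa using hterms_nodup)
    simpa [PySem.Dict.items] using this
  -- B's side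
  set f : PySem.Dict String Int → String × Int → PySem.Dict String Int :=
    fun d p => d.insert p.1 (d.getD p.1 0 + p.2) with hf
  have hBkeysnodup : (dict_b.foldl f (PySem.Dict.mk dict_a)).keys.Nodup := by
    apply PySem.Dict.nodup_keys_foldl_insert_key dict_b (fun p => p.1)
      (fun d p => d.getD p.1 0 + p.2)
    simpa [PySem.Dict.keys] using ha
  have hBkeys : (dict_b.foldl f (PySem.Dict.mk dict_a)).keys
      = PySem.Set.update (dict_a.map (·.1)) (dict_b.map (·.1)) := by
    have := PySem.Dict.keys_foldl_insert_key (l := dict_b) (key := fun p => p.1)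
      (f := fun d p => d.getD p.1 0 + p.2) (d := PySem.Dict.mk dict_a)
    simpa [PySem.Dict.keys, hf] using this
  have hB : vector_dict_add_alt dict_a dict_b
      = (dict_b.foldl f (PySem.Dict.mk dict_a)).keys.map
          (fun k => (k, (dict_b.foldl f (PySem.Dict.mk dict_a)).getD k 0)) :=
    PySem.Dict.items_eq_map_keys _ hBkeysnodup 0
  rw [hA, hB, hBkeys]
  have hunion : PySem.Set.union (PySem.Set.ofList (dict_a.map (·.1))) (PySem.Set.ofList (dict_b.map (·.1)))
      = PySem.Set.update (dict_a.map (·.1)) (dict_b.map (·.1)) := by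
    rw [hka, PySem.Set.ofList_eq_self_of_nodup _ hb]; rfl
  rw [hunion]
  apply List.map_congr_left
  intro k _
  rw [getD_accum dict_b hb (PySem.Dict.mk dict_a) k]
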